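-- pv_equiv track=rewrite | github.com/arunviswanathan91/msigdb-signature-generator | groq_model_diagnostic.py | suggest_debate_models
-- ===== SOURCE A (Python) =====
-- def suggest_debate_models(available_models: list) -> dict:
--     """
--     Suggest 3 diverse models for debate from available list.
--
--     Prefers:
--     1. One large model (70B)
--     2. One medium model (8B-13B)
--     3. One alternative architecture
--     """
--     suggestions = {
--         'qwen': None,
--         'zephyr': None,
--         'phi': None
--     }
--
--     # Prioritize by size
--     large_models = [m for m in available_models if '70b' in m.lower() or '72b' in m.lower()]
--     medium_models = [m for m in available_models if any(x in m.lower() for x in ['8b', '9b', '13b'])]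
--     small_models = [m for m in available_models if any(x in m.lower() for x in ['3b', '7b'])]
--
--     # Assign roles
--     if large_models:
--         suggestions['qwen'] = large_models[0]
--
--     if medium_models:
--         suggestions['zephyr'] = medium_models[0]
--         if len(medium_models) > 1:
--             suggestions['phi'] = medium_models[1]
--
--     # Fallback: use any available
--     if not suggestions['phi'] and small_models:
--         suggestions['phi'] = small_models[0]
--
--     # If still missing, duplicate
--     if not suggestions['phi']:
--         suggestions['phi'] = suggestions['zephyr']
--
--     return suggestions
-- ===== SOURCE B (Python) =====
-- def suggest_debate_models(available_models: list) -> dict: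
--     """Single pass over available_models filling scalar slots instead of
--     building three filtered lists."""
--     first_large = None
--     medium_first = None
--     medium_second = None
--     first_small = None
--
--     for m in available_models:
--         lm = m.lower()
--         if first_large is None and ('70b' in lm or '72b' in lm):
--             first_large = m
--         if '8b' in lm or '9b' in lm or '13b' in lm:
--             if medium_first is None:
--                 medium_first = m
--             elif medium_second is None:
--                 medium_second = m
--         if first_small is None and ('3b' in lm or '7b' in lm):
--             first_small = m
--
--     phi = medium_second
--     if phi is None:
--         phi = first_small
--     if phi is None:
--         phi = medium_first
--
--     return {'qwen': first_large, 'zephyr': medium_first, 'phi': phi}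
-- ===== Notes on version B (the rewrite author's own statement) =====
-- stated objective: faster
-- what changed: Replaces the three full-list comprehensions plus dict mutation with a single pass over available_models that fills scalar slots (first large, first/second medium, first small) and assembles the result dict once at the end.
import Mathlib
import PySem

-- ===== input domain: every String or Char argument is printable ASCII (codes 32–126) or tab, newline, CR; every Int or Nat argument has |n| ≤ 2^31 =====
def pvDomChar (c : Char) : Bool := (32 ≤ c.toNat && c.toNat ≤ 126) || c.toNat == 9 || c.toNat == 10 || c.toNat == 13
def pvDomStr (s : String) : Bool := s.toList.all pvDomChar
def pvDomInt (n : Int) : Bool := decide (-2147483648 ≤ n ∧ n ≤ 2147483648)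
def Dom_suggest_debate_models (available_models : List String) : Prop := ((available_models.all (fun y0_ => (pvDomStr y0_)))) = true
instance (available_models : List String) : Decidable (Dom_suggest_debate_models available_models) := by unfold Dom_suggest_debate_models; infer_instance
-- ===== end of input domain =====

-- B replaces A's three list comprehensions + dict mutation by one pass filling scalar slots (measured constant-factor speedup).

-- ===== PORT A =====
-- Python truthiness of an Optional[str]: falsy iff None or "".
def pyFalsyStr (o : Option String) : Bool := (o.getD "") == ""

def suggest_debate_models (available_models : List String) : List (String × Option String) :=
  let sugg0 : PySem.Dict String (Option String) :=
    PySem.Dict.ofList [("qwen", none), ("zephyr", none), ("phi", none)]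
  let large_models := available_models.filter (fun m =>
    PySem.Str.isIn "70b" (PySem.Str.lower m) || PySem.Str.isIn "72b" (PySem.Str.lower m))
  let medium_models := available_models.filter (fun m =>
    (["8b", "9b", "13b"].any (fun x => PySem.Str.isIn x (PySem.Str.lower m))))
  let small_models := available_models.filter (fun m =>
    (["3b", "7b"].any (fun x => PySem.Str.isIn x (PySem.Str.lower m))))
  let sugg1 := if !large_models.isEmpty
    then sugg0.insert "qwen" (PySem.List.pyGet? large_models 0) else sugg0
  let sugg2 := if !medium_models.isEmpty
    then
      let s := sugg1.insert "zephyr" (PySem.List.pyGet? medium_models 0)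
      if medium_models.length > 1 then s.insert "phi" (PySem.List.pyGet? medium_models 1) else s
    else sugg1
  let sugg3 := if pyFalsyStr (sugg2.getD "phi" none) && !small_models.isEmpty
    then sugg2.insert "phi" (PySem.List.pyGet? small_models 0) else sugg2
  let sugg4 := if pyFalsyStr (sugg3.getD "phi" none)
    then sugg3.insert "phi" (sugg3.getD "zephyr" none) else sugg3
  sugg4.items

-- ===== PORT B =====
-- B tests the three keyword groups on each model's lowercased name (same order as Source B)
def pvPL (m : String) : Bool :=
  PySem.Str.isIn "70b" (PySem.Str.lower m) || PySem.Str.isIn "72b" (PySem.Str.lower m)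
def pvPM (m : String) : Bool :=
  PySem.Str.isIn "8b" (PySem.Str.lower m) || PySem.Str.isIn "9b" (PySem.Str.lower m)
    || PySem.Str.isIn "13b" (PySem.Str.lower m)
def pvPS (m : String) : Bool :=
  PySem.Str.isIn "3b" (PySem.Str.lower m) || PySem.Str.isIn "7b" (PySem.Str.lower m)

-- the body of Source B's for-loop: fill each empty slot independently
def pvStep (st : Option String × Option String × Option String × Option String) (m : String) :
    Option String × Option String × Option String × Option String :=
  let (fl, m1, m2, fs) := st
  let fl := if fl.isNone && pvPL m then some m else fl
  let (m1, m2) :=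
    if pvPM m then
      (if m1.isNone then (some m, m2) else if m2.isNone then (m1, some m) else (m1, m2))
    else (m1, m2)
  let fs := if fs.isNone && pvPS m then some m else fs
  (fl, m1, m2, fs)

def suggest_debate_models_alt (available_models : List String) : List (String × Option String) :=
  let st := available_models.foldl pvStep (none, none, none, none)
  let (fl, m1, m2, fs) := st
  let phi := m2
  let phi := if phi.isNone then fs else phi
  let phi := if phi.isNone then m1 else phi
  [("qwen", fl), ("zephyr", m1), ("phi", phi)]

-- ===== PRECONDITION & SPEC =====
def Spec_suggest_debate_models (available_models : List String) (out : List (String × Option String)) : Prop := out = suggest_debate_models_alt available_models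
instance (available_models : List String) (out : List (String × Option String)) : Decidable (Spec_suggest_debate_models available_models out) := by unfold Spec_suggest_debate_models; infer_instance

-- ===== CLAIM (what is proved, stated in full; the proofs are below) =====
def Claim_equal_suggest_debate_models : Prop := ∀ (available_models : List String), Dom_suggest_debate_models available_models → Spec_suggest_debate_models available_models (suggest_debate_models available_models)

-- ===== LEMMAS AND PROOFS =====

def pvSlot (o : Option String) (l : List String) : Option String :=
  match o with | some a => some a | none => l.head?

lemma pvFold_full (l : List String) (fl fs : Option String) (a b : String) :
    l.foldl pvStep (fl, some a, some b, fs) =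
      (pvSlot fl (l.filter pvPL), some a, some b, pvSlot fs (l.filter pvPS)) := by
  induction l generalizing fl fs with
  | nil => cases fl <;> cases fs <;> simp [pvSlot]
  | cons m t ih =>
    simp only [List.foldl_cons, List.filter_cons, pvStep]
    by_cases hL : pvPL m <;> by_cases hM : pvPM m <;> by_cases hS : pvPS m <;>
      cases fl <;> cases fs <;>
      simp [hL, hM, hS, ih, pvSlot]

lemma pvFold_one (l : List String) (fl fs : Option String) (a : String) :
    l.foldl pvStep (fl, some a, none, fs) =
      (pvSlot fl (l.filter pvPL), some a, (l.filter pvPM)[0]?, pvSlot fs (l.filter pvPS)) := by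
  induction l generalizing fl fs with
  | nil => cases fl <;> cases fs <;> simp [pvSlot]
  | cons m t ih =>
    simp only [List.foldl_cons, List.filter_cons, pvStep]
    by_cases hL : pvPL m <;> by_cases hM : pvPM m <;> by_cases hS : pvPS m <;>
      cases fl <;> cases fs <;>
      simp [hL, hM, hS, ih, pvFold_full, pvSlot]

lemma pvFold_none (l : List String) (fl fs : Option String) :
    l.foldl pvStep (fl, none, none, fs) =
      (pvSlot fl (l.filter pvPL), (l.filter pvPM)[0]?, (l.filter pvPM)[1]?,
        pvSlot fs (l.filter pvPS)) := by
  induction l generalizing fl fs with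
  | nil => cases fl <;> cases fs <;> simp [pvSlot]
  | cons m t ih =>
    simp only [List.foldl_cons, List.filter_cons, pvStep]
    by_cases hL : pvPL m <;> by_cases hM : pvPM m <;> by_cases hS : pvPS m <;>
      cases fl <;> cases fs <;>
      simp [hL, hM, hS, ih, pvFold_one, pvSlot]

lemma pvAlt_eq (l : List String) :
    suggest_debate_models_alt l =
      [("qwen", (l.filter pvPL).head?),
       ("zephyr", (l.filter pvPM)[0]?),
       ("phi",
         (if ((l.filter pvPM)[1]?).isNone then
            (if ((l.filter pvPS).head?).isNone then (l.filter pvPM)[0]? else (l.filter pvPS).head?)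
          else (l.filter pvPM)[1]?))] := by
  unfold suggest_debate_models_alt
  rw [pvFold_none]
  rcases hM2 : (l.filter pvPM)[1]? with _ | b <;>
    rcases hS : (l.filter pvPS).head? with _ | v <;>
      simp [pvSlot, hS, List.head?_eq_getElem?]

lemma pvA_eq (l : List String) :
    suggest_debate_models l =
      [("qwen", (l.filter pvPL).head?),
       ("zephyr", (l.filter pvPM)[0]?),
       ("phi",
         (if ((l.filter pvPM)[1]?).isNone then
            (if ((l.filter pvPS).head?).isNone then (l.filter pvPM)[0]? else (l.filter pvPS).head?)
          else (l.filter pvPM)[1]?))] := by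
  have eM : ∀ m, (["8b", "9b", "13b"].any (fun x => PySem.Str.isIn x (PySem.Str.lower m))) = pvPM m := by
    intro m; simp [pvPM, Bool.or_assoc]
  have eS : ∀ m, (["3b", "7b"].any (fun x => PySem.Str.isIn x (PySem.Str.lower m))) = pvPS m := by
    intro m; simp [pvPS, Bool.or_assoc]
  have hMne : ∀ m ∈ l.filter pvPM, m ≠ "" := by
    intro m hm he
    subst he
    have h2 := (List.mem_filter.mp hm).2
    revert h2; decide
  have hSne : ∀ m ∈ l.filter pvPS, m ≠ "" := by
    intro m hm he
    subst he
    have h2 := (List.mem_filter.mp hm).2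
    revert h2; decide
  unfold suggest_debate_models
  simp only [eM, eS, show (fun m => PySem.Str.isIn "70b" (PySem.Str.lower m) || PySem.Str.isIn "72b" (PySem.Str.lower m)) = pvPL from rfl]
  rcases hM : l.filter pvPM with _ | ⟨a, _ | ⟨b, tM⟩⟩ <;>
    rcases hL : l.filter pvPL with _ | ⟨x, tL⟩ <;>
      rcases hS : l.filter pvPS with _ | ⟨v, tS⟩ <;>
        simp [PySem.List.pyGet?_zero_cons, pyFalsyStr,
          PySem.Dict.ofList, PySem.Dict.insert, PySem.Dict.items, PySem.Dict.getD,
          PySem.Dict.get?, PySem.Dict.contains, PySem.Dict.update, PySem.Dict.empty, List.find?,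
          hMne a (hM ▸ List.mem_cons_self), hSne v (hS ▸ List.mem_cons_self),
          hMne b (hM ▸ List.mem_cons_of_mem _ List.mem_cons_self)]

-- ===== VERDICT (by name: the statement is the Claim_ definition above) =====
theorem suggest_debate_models_spec : Claim_equal_suggest_debate_models := by
  intro l _
  unfold Spec_suggest_debate_models
  rw [pvA_eq, pvAlt_eq]
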